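-- pv_equiv track=rewrite | github.com/barteksmolkowski/mega_projekt | PyTorch/preprocessing/geometry.py | _apply_averaging
-- ===== SOURCE A (Python) =====
-- from itertools import product
--
-- def _apply_averaging(matrix, rangeList, new_matrix):
--     for (idx_h, pair_h), (idx_w, pair_w) in product(enumerate(rangeList[0]), enumerate(rangeList[1])):
--         sum_numbers = 0
--         divider = 0
--         for i, j in product(range(pair_h[0], pair_h[1] + 1), range(pair_w[0], pair_w[1] + 1)):
--             sum_numbers += matrix[i][j]
--             divider += 1
--         if divider > 0:
--             new_matrix[idx_h][idx_w] = sum_numbers // divider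
--     return new_matrix
-- ===== SOURCE B (Python) =====
-- def _apply_averaging(matrix, rangeList, new_matrix):
--     pref = []
--     for row in matrix:
--         p = [0]
--         acc = 0
--         for x in row:
--             acc += x
--             p.append(acc)
--         pref.append(p)
--     hs = rangeList[0]
--     ws = rangeList[1]
--     for ih, (a, b) in enumerate(hs):
--         for iw, (c, d) in enumerate(ws):
--             if a <= b and c <= d:
--                 total = 0
--                 for i in range(a, b + 1):
--                     total += pref[i][d + 1] - pref[i][c]
--                 new_matrix[ih][iw] = total // ((b - a + 1) * (d - c + 1))
--     return new_matrix
-- ===== Notes on version B (the rewrite author's own statement) =====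
-- stated objective: alternative
-- what changed: B precomputes per-row prefix sums once so each block sum is a sum of O(height) two-entry differences and the divider is the closed-form block area, instead of A's per-block double loop over every cell.
-- outside the precondition, e.g. on _apply_averaging([[1, 5]], [[(0, 0)], [(-1, -1)]], [[0]]): A returns [[5]], B returns [[-6]]
import Mathlib
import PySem

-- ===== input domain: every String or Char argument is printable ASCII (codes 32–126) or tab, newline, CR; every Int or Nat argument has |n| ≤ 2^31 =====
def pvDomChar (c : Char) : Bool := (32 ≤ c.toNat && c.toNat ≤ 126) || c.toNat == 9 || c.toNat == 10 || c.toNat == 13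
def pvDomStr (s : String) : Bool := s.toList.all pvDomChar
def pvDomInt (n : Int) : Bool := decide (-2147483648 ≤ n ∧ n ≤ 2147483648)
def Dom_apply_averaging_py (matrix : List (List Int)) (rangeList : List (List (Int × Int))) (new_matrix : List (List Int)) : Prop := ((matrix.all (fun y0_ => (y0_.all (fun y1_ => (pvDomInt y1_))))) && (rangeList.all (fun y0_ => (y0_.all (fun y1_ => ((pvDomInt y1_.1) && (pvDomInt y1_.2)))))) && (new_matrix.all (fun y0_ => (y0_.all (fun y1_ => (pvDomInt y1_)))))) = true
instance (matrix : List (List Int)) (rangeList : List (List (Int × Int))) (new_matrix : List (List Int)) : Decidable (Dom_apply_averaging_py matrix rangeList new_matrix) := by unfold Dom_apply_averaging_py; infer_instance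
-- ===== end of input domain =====

-- B replaces A's per-block double loop by per-row prefix sums (block sum = a short sum of two-entry
-- differences) and a closed-form divider; objective: alternative (fewer cell reads per block, at the
-- cost of one prefix pass). Both Pythons mutate new_matrix in place identically; the theorems are
-- about the return value.


-- ===== PORT A =====
-- matrix[i][j]; total form of Python indexing — Pre_ keeps every accessed index in range,
-- so the defaults never fire on admitted inputs.
def pvCell (matrix : List (List Int)) (i j : Int) : Int :=
  PySem.List.pyGetD (PySem.List.pyGetD matrix i []) j 0

-- new_matrix[ih][iw] = v (Python item assignment on a nested list)
def pvSet2 (nm : List (List Int)) (ih iw : Int) (v : Int) : List (List Int) :=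
  PySem.List.pySetD nm ih (PySem.List.pySetD (PySem.List.pyGetD nm ih []) iw v)

def apply_averaging_py (matrix : List (List Int)) (rangeList : List (List (Int × Int))) (new_matrix : List (List Int)) : List (List Int) :=
  (PySem.List.enumerate (PySem.List.pyGetD rangeList 0 []) 0).foldl (fun nm ph =>
    (PySem.List.enumerate (PySem.List.pyGetD rangeList 1 []) 0).foldl (fun nm qw =>
      let sd := (PySem.List.pyRange ph.2.1 (ph.2.2 + 1) 1).foldl (fun sd i =>
            (PySem.List.pyRange qw.2.1 (qw.2.2 + 1) 1).foldl (fun sd j =>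
              (sd.1 + pvCell matrix i j, sd.2 + 1)) sd) ((0 : Int), (0 : Int))
      if sd.2 > 0 then pvSet2 nm ph.1 qw.1 (PySem.Int.floordiv sd.1 sd.2) else nm) nm) new_matrix

-- ===== PORT B =====
-- prefix sums of one row: p = [0]; acc = 0; for x in row: acc += x; p.append(acc)
def pvPrefix (row : List Int) : List Int :=
  (row.foldl (fun (st : List Int × Int) x => (st.1 ++ [st.2 + x], st.2 + x)) ([0], 0)).1

def apply_averaging_py_alt (matrix : List (List Int)) (rangeList : List (List (Int × Int))) (new_matrix : List (List Int)) : List (List Int) :=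
  let pref := matrix.map pvPrefix
  (PySem.List.enumerate (PySem.List.pyGetD rangeList 0 []) 0).foldl (fun nm ph =>
    (PySem.List.enumerate (PySem.List.pyGetD rangeList 1 []) 0).foldl (fun nm qw =>
      if ph.2.1 ≤ ph.2.2 ∧ qw.2.1 ≤ qw.2.2 then
        let total := (PySem.List.pyRange ph.2.1 (ph.2.2 + 1) 1).foldl (fun t i =>
          t + (PySem.List.pyGetD (PySem.List.pyGetD pref i []) (qw.2.2 + 1) 0
               - PySem.List.pyGetD (PySem.List.pyGetD pref i []) qw.2.1 0)) 0
        pvSet2 nm ph.1 qw.1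
          (PySem.Int.floordiv total ((ph.2.2 - ph.2.1 + 1) * (qw.2.2 - qw.2.1 + 1)))
      else nm) nm) new_matrix

-- ===== PRECONDITION & SPEC =====
-- Pre_ excludes inputs on which A raises (rangeList shorter than 2, an out-of-range row index,
-- a column index outside [0, row length) for some touched row, or a new_matrix too short for an
-- assigned cell) and, the one narrowing beyond crashes, blocks whose column bounds are negative:
-- there A's value comes from Python's negative-index wraparound and B's from a wrapped prefix-table
-- read — a corner no caller would specify either way.
def Pre_apply_averaging_py (matrix : List (List Int)) (rangeList : List (List (Int × Int))) (new_matrix : List (List Int)) : Prop :=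
  2 ≤ rangeList.length ∧
  ∀ ph ∈ PySem.List.enumerate (PySem.List.pyGetD rangeList 0 []) 0,
    ∀ qw ∈ PySem.List.enumerate (PySem.List.pyGetD rangeList 1 []) 0,
      ph.2.1 ≤ ph.2.2 → qw.2.1 ≤ qw.2.2 →
        -(matrix.length : Int) ≤ ph.2.1 ∧ ph.2.2 < (matrix.length : Int) ∧ 0 ≤ qw.2.1 ∧
        (∀ i ∈ PySem.List.pyRange ph.2.1 (ph.2.2 + 1) 1,
            qw.2.2 < ((PySem.List.pyGetD matrix i []).length : Int)) ∧
        ph.1 < (new_matrix.length : Int) ∧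
        qw.1 < ((PySem.List.pyGetD new_matrix ph.1 []).length : Int)

instance (matrix : List (List Int)) (rangeList : List (List (Int × Int))) (new_matrix : List (List Int)) : Decidable (Pre_apply_averaging_py matrix rangeList new_matrix) := by unfold Pre_apply_averaging_py; infer_instance

def pvWitness_apply_averaging_py : List (List Int) × (List (List (Int × Int))) × List (List Int) :=
  ([[1, 2], [3, 4]], [[(0, 1)], [(0, 1)]], [[0]])

def Spec_apply_averaging_py (matrix : List (List Int)) (rangeList : List (List (Int × Int))) (new_matrix : List (List Int)) (out : List (List Int)) : Prop := out = apply_averaging_py_alt matrix rangeList new_matrix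
instance (matrix : List (List Int)) (rangeList : List (List (Int × Int))) (new_matrix : List (List Int)) (out : List (List Int)) : Decidable (Spec_apply_averaging_py matrix rangeList new_matrix out) := by unfold Spec_apply_averaging_py; infer_instance

-- ===== CLAIM (what is proved, stated in full; the proofs are below) =====
def Claim_equal_apply_averaging_py : Prop := ∀ (matrix : List (List Int)) (rangeList : List (List (Int × Int))) (new_matrix : List (List Int)), Dom_apply_averaging_py matrix rangeList new_matrix → Pre_apply_averaging_py matrix rangeList new_matrix → Spec_apply_averaging_py matrix rangeList new_matrix (apply_averaging_py matrix rangeList new_matrix)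

-- ===== LEMMAS AND PROOFS =====

theorem pvPrefix_spec (row : List Int) : ∀ (p : List Int) (acc : Int),
    (row.foldl (fun (st : List Int × Int) x => (st.1 ++ [st.2 + x], st.2 + x)) (p, acc)).1
      = p ++ (List.range row.length).map (fun k => acc + (row.take (k + 1)).sum) := by
  induction row with
  | nil => simp
  | cons x xs ih =>
    intro p acc
    simp only [List.foldl_cons, ih, List.length_cons, List.range_succ_eq_map, List.map_cons,
      List.map_map, List.take_succ_cons, List.sum_cons, List.append_assoc]
    congr 1
    simp only [List.singleton_append, List.cons.injEq]
    constructor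
    · simp
    · apply List.map_congr_left
      intro k _
      simp [Function.comp]
      ring

theorem pvPrefix_eq (row : List Int) :
    pvPrefix row = (List.range (row.length + 1)).map (fun k => (row.take k).sum) := by
  have h := pvPrefix_spec row [0] 0
  simp only [pvPrefix, h]
  rw [List.range_succ_eq_map]
  simp

theorem pvPrefix_getD (row : List Int) (k : Nat) (hk : k ≤ row.length) :
    PySem.List.pyGetD (pvPrefix row) (k : Int) 0 = (row.take k).sum := by
  rw [pvPrefix_eq, PySem.List.pyGetD_natCast]
  rw [List.getD_eq_getElem?_getD]
  rw [List.getElem?_map]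
  rw [List.getElem?_range (by omega)]
  simp

theorem pvStep1 (cell : Int → Int) (l : List Int) (sd : Int × Int) :
    l.foldl (fun sd j => (sd.1 + cell j, sd.2 + 1)) sd
      = (sd.1 + (l.map cell).sum, sd.2 + (l.length : Int)) := by
  induction l generalizing sd with
  | nil => simp
  | cons x xs ih =>
    simp only [List.foldl_cons, ih, List.map_cons, List.sum_cons, List.length_cons,
      Prod.mk.injEq]
    push_cast
    constructor <;> ring

theorem pvStep2 (f : Int → Int) (k : Int) (l : List Int) (sd : Int × Int) :
    l.foldl (fun sd i => (sd.1 + f i, sd.2 + k)) sd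
      = (sd.1 + (l.map f).sum, sd.2 + k * (l.length : Int)) := by
  induction l generalizing sd with
  | nil => simp
  | cons x xs ih =>
    simp only [List.foldl_cons, ih, List.map_cons, List.sum_cons, List.length_cons,
      Prod.mk.injEq]
    push_cast
    constructor <;> ring

-- A's inner double loop, summed and counted in closed form
theorem pvInner_eq (matrix : List (List Int)) (a b c d : Int) :
    (PySem.List.pyRange a (b + 1) 1).foldl (fun sd i =>
        (PySem.List.pyRange c (d + 1) 1).foldl (fun sd j =>
          (sd.1 + pvCell matrix i j, sd.2 + 1)) sd) ((0 : Int), (0 : Int))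
      = (((PySem.List.pyRange a (b + 1) 1).map (fun i =>
            ((PySem.List.pyRange c (d + 1) 1).map (fun j => pvCell matrix i j)).sum)).sum,
         ((d + 1 - c).toNat : Int) * ((b + 1 - a).toNat : Int)) := by
  simp only [pvStep1, pvStep2, PySem.List.length_pyRange_one, zero_add]

-- pyGetD commutes with map on an in-range index
theorem pvGetD_map (l : List (List Int)) (i : Int) (hlo : -(l.length : Int) ≤ i)
    (hhi : i < (l.length : Int)) :
    PySem.List.pyGetD (l.map pvPrefix) i [] = pvPrefix (PySem.List.pyGetD l i []) := by
  rcases le_or_gt 0 i with h0 | h0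
  · obtain ⟨k, rfl⟩ : ∃ k : Nat, i = (k : Int) := ⟨i.toNat, by omega⟩
    have hk : k < l.length := by exact_mod_cast hhi
    rw [PySem.List.pyGetD_natCast, PySem.List.pyGetD_natCast]
    simp [List.getD_eq_getElem?_getD, hk]
  · obtain ⟨k, hk, rfl⟩ : ∃ k : Nat, 0 < k ∧ i = -(k : Int) :=
      ⟨(-i).toNat, by omega, by omega⟩
    rw [PySem.List.pyGetD_neg_natCast _ _ _ hk (by simpa using hlo),
        PySem.List.pyGetD_neg_natCast _ _ _ hk (by omega)]
    simp only [List.length_map]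
    rw [List.getElem_map]

theorem pvSeg_nat (row : List Int) (cN dN : Nat) (h : cN ≤ dN) (hd : dN < row.length) :
    ((PySem.List.pyRange (cN : Int) ((dN : Int) + 1) 1).map
        (fun j => PySem.List.pyGetD row j 0)).sum
      = (row.take (dN + 1)).sum - (row.take cN).sum := by
  induction dN, h using Nat.le_induction with
  | base =>
    rw [PySem.List.pyRange_one_singleton]
    simp only [List.map_cons, List.map_nil, List.sum_cons, List.sum_nil, add_zero]
    rw [PySem.List.pyGetD_natCast, List.sum_take_succ (p := hd)]
    simp [List.getD_eq_getElem?_getD, List.getElem?_eq_getElem hd]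
  | succ m hm ih =>
    have hmlen : m < row.length := by omega
    push_cast
    rw [PySem.List.pyRange_one_succ_right (by exact_mod_cast by omega : (cN : Int) ≤ (m : Int) + 1)]
    rw [List.map_append, List.sum_append, ih hmlen]
    have : ((m : Int) + 1) = ((m + 1 : Nat) : Int) := by push_cast; ring
    simp only [List.map_cons, List.map_nil, List.sum_cons, List.sum_nil, add_zero]
    rw [this, PySem.List.pyGetD_natCast, List.sum_take_succ (p := hd)]
    simp [List.getD_eq_getElem?_getD, List.getElem?_eq_getElem hd]
    ring

-- the prefix-difference equals the row-segment sum
theorem pvSeg_eq (row : List Int) (c d : Int) (hc : 0 ≤ c) (hcd : c ≤ d)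
    (hd : d < (row.length : Int)) :
    PySem.List.pyGetD (pvPrefix row) (d + 1) 0 - PySem.List.pyGetD (pvPrefix row) c 0
      = ((PySem.List.pyRange c (d + 1) 1).map (fun j => PySem.List.pyGetD row j 0)).sum := by
  obtain ⟨cN, rfl⟩ : ∃ n : Nat, c = (n : Int) := ⟨c.toNat, by omega⟩
  obtain ⟨dN, rfl⟩ : ∃ n : Nat, d = (n : Int) := ⟨d.toNat, by omega⟩
  have hcd' : cN ≤ dN := by exact_mod_cast hcd
  have hd' : dN < row.length := by exact_mod_cast hd
  have h1 : ((dN : Int) + 1) = ((dN + 1 : Nat) : Int) := by push_cast; ring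
  rw [h1, pvPrefix_getD row (dN + 1) (by omega), pvPrefix_getD row cN (by omega), ← h1]
  rw [pvSeg_nat row cN dN hcd' hd']

theorem apply_averaging_py_spec : Claim_equal_apply_averaging_py := by
  intro matrix rangeList new_matrix _hdom hpre
  obtain ⟨-, hblk⟩ := hpre
  unfold Spec_apply_averaging_py
  simp only [apply_averaging_py, apply_averaging_py_alt]
  apply PySem.List.foldl_congr_mem'
  intro ph hph nm
  apply PySem.List.foldl_congr_mem'
  intro qw hqw nm'
  have hblk' := hblk ph hph qw hqw
  rw [pvInner_eq]
  by_cases hne : ph.2.1 ≤ ph.2.2 ∧ qw.2.1 ≤ qw.2.2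
  · obtain ⟨hab, hcd⟩ := hne
    obtain ⟨hlo, hhi, hc0, hrow, -, -⟩ := hblk' hab hcd
    have hdiv : (((qw.2.2 + 1 - qw.2.1).toNat : Int) * ((ph.2.2 + 1 - ph.2.1).toNat : Int)) > 0 := by
      have h1 : (0:Int) < ((qw.2.2 + 1 - qw.2.1).toNat : Int) := by omega
      have h2 : (0:Int) < ((ph.2.2 + 1 - ph.2.1).toNat : Int) := by omega
      positivity
    rw [if_pos hdiv, if_pos ⟨hab, hcd⟩]
    have hdiv' : (((qw.2.2 + 1 - qw.2.1).toNat : Int) * ((ph.2.2 + 1 - ph.2.1).toNat : Int))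
        = (ph.2.2 - ph.2.1 + 1) * (qw.2.2 - qw.2.1 + 1) := by
      have h1 : ((qw.2.2 + 1 - qw.2.1).toNat : Int) = qw.2.2 - qw.2.1 + 1 := by omega
      have h2 : ((ph.2.2 + 1 - ph.2.1).toNat : Int) = ph.2.2 - ph.2.1 + 1 := by omega
      rw [h1, h2]; ring
    have hsum : ((PySem.List.pyRange ph.2.1 (ph.2.2 + 1) 1).map (fun i =>
          ((PySem.List.pyRange qw.2.1 (qw.2.2 + 1) 1).map (fun j => pvCell matrix i j)).sum)).sum
        = (PySem.List.pyRange ph.2.1 (ph.2.2 + 1) 1).foldl (fun t i =>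
            t + (PySem.List.pyGetD (PySem.List.pyGetD (List.map pvPrefix matrix) i []) (qw.2.2 + 1) 0
                 - PySem.List.pyGetD (PySem.List.pyGetD (List.map pvPrefix matrix) i []) qw.2.1 0)) 0 := by
      rw [PySem.List.foldl_add]
      rw [zero_add]
      apply congrArg
      apply List.map_congr_left
      intro i hi
      have hi' := (PySem.List.mem_pyRange_one.mp hi)
      have hmap := pvGetD_map matrix i (by omega) (by omega)
      rw [hmap]
      rw [pvSeg_eq _ _ _ hc0 hcd (hrow i hi)]
      rfl
    rw [hsum, hdiv']
  · have hz : (((qw.2.2 + 1 - qw.2.1).toNat : Int) * ((ph.2.2 + 1 - ph.2.1).toNat : Int)) = 0 := by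
      rcases not_and_or.mp hne with h | h
      · have : ((ph.2.2 + 1 - ph.2.1).toNat : Int) = 0 := by omega
        rw [this]; ring
      · have : ((qw.2.2 + 1 - qw.2.1).toNat : Int) = 0 := by omega
        rw [this]; ring
    rw [if_neg (by rw [hz]; omega), if_neg hne]
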